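-- pv_equiv track=rewrite | github.com/pypi-data/pypi-mirror-34 | packages/cate/cate-0.0.1.tar.gz/cate-0.0.1/src/cate/main.py | detectDoubles
-- ===== SOURCE A (Python) =====
-- def detectDoubles(permutationlist):
--     """check whether permutationList contains multiple crossings for the same strand"""
--     already_permuted = set()
--     for perm in permutationlist:
--         for strand in perm:
--             if strand in already_permuted:
--                 return True  # strand is permuted more than once: double
--             else:
--                 already_permuted.add(strand)
--     return False
-- ===== SOURCE B (Python) =====
-- def detectDoubles(permutationlist):
--     """check whether permutationList contains multiple crossings for the same strand"""
--     strands = sorted(strand for perm in permutationlist for strand in perm)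
--     return any(a == b for a, b in zip(strands, strands[1:]))
-- ===== Notes on version B (the rewrite author's own statement) =====
-- stated objective: alternative
-- what changed: Replaces the interleaved seen-set scan with early return by flattening all strands, sorting them, and checking adjacent pairs for equality.
import Mathlib
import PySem

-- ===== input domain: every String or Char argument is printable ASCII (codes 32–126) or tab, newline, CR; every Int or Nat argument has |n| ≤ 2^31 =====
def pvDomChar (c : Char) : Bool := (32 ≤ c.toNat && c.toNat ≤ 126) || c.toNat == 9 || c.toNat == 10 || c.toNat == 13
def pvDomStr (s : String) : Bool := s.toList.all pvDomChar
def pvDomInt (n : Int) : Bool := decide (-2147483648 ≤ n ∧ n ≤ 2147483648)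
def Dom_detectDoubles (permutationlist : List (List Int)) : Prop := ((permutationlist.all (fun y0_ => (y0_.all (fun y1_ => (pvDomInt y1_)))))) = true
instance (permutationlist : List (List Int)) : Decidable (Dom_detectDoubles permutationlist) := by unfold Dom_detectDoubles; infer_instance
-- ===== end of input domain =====

-- B flattens all strands, sorts them, and scans adjacent pairs for equality (sort-based duplicate detection; alternative decomposition).

-- ===== PORT A =====
-- inner 'for strand in perm' loop: none = 'return True' fired, some seen' = loop finished
def detectDoublesInner (seen : PySem.Set Int) : List Int → Option (PySem.Set Int)
  | [] => some seen
  | strand :: rest =>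
    if PySem.Set.contains seen strand then none
    else detectDoublesInner (PySem.Set.add seen strand) rest

-- outer 'for perm in permutationlist' loop
def detectDoublesOuter (seen : PySem.Set Int) : List (List Int) → Bool
  | [] => false
  | perm :: rest =>
    match detectDoublesInner seen perm with
    | none => true
    | some seen' => detectDoublesOuter seen' rest

def detectDoubles (permutationlist : List (List Int)) : Bool :=
  detectDoublesOuter PySem.Set.empty permutationlist

-- ===== PORT B =====
def detectDoubles_alt (permutationlist : List (List Int)) : Bool :=
  -- strands = sorted(strand for perm in permutationlist for strand in perm)
  let strands := PySem.List.sorted (permutationlist.flatMap (fun perm => perm)) (fun x => x) false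
  -- any(a == b for a, b in zip(strands, strands[1:])); strands[1:] = drop 1 (exact for nonneg start slice)
  (strands.zip (strands.drop 1)).any (fun p => p.1 == p.2)

-- ===== PRECONDITION & SPEC =====
def Spec_detectDoubles (permutationlist : List (List Int)) (out : Bool) : Prop := out = detectDoubles_alt permutationlist
instance (permutationlist : List (List Int)) (out : Bool) : Decidable (Spec_detectDoubles permutationlist out) := by unfold Spec_detectDoubles; infer_instance

-- ===== CLAIM (what is proved, stated in full; the proofs are below) =====
def Claim_equal_detectDoubles : Prop := ∀ (permutationlist : List (List Int)), Dom_detectDoubles permutationlist → Spec_detectDoubles permutationlist (detectDoubles permutationlist)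

-- ===== LEMMAS AND PROOFS =====

-- the inner loop returns none exactly when seen ++ xs has a duplicate, else the extended seen list
theorem detectDoublesInner_eq (xs : List Int) (seen : PySem.Set Int) (hseen : seen.Nodup) :
    detectDoublesInner seen xs = if (seen ++ xs).Nodup then some (seen ++ xs) else none := by
  induction xs generalizing seen with
  | nil => simp [detectDoublesInner, hseen]
  | cons x xs ih =>
    by_cases hx : x ∈ seen
    · have : ¬ (seen ++ x :: xs).Nodup := by
        intro h
        exact (List.disjoint_of_nodup_append h) hx (by simp)
      simp [detectDoublesInner, PySem.Set.contains, hx, this]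
    · have hadd : PySem.Set.add seen x = seen ++ [x] := by
        simp [PySem.Set.add, PySem.Set.contains, hx]
      have hnodup' : (seen ++ [x]).Nodup :=
        hseen.append (List.nodup_singleton x) (by simp [List.disjoint_singleton, hx])
      have := ih (seen ++ [x]) hnodup'
      rw [detectDoublesInner]
      simp only [PySem.Set.contains, List.contains_eq_mem, hx, decide_false, Bool.false_eq_true,
        if_false, hadd, this, List.append_assoc, List.singleton_append]

-- the outer loop returns true exactly when seen ++ flatten has a duplicate
theorem detectDoublesOuter_eq (ps : List (List Int)) (seen : PySem.Set Int) (hseen : seen.Nodup) :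
    detectDoublesOuter seen ps = !decide ((seen ++ ps.flatten).Nodup) := by
  induction ps generalizing seen with
  | nil => simp [detectDoublesOuter, hseen]
  | cons p ps ih =>
    rw [detectDoublesOuter, detectDoublesInner_eq p seen hseen]
    by_cases h : (seen ++ p).Nodup
    · rw [if_pos h]
      have := ih (seen ++ p) h
      simp only [this, List.flatten_cons, List.append_assoc]
      rfl
    · rw [if_neg h]
      have hsub : List.Sublist (seen ++ p) (seen ++ (p :: ps).flatten) := by
        simp only [List.flatten_cons, ← List.append_assoc]
        exact List.sublist_append_left _ _
      have hnn : ¬ (seen ++ (p :: ps).flatten).Nodup := fun hn => h (hn.sublist hsub)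
      simp only [List.flatten_cons] at hnn
      show true = !decide ((seen ++ (p :: ps).flatten).Nodup)
      simp [hnn]

-- on a ≤-sorted list, an adjacent equal pair exists iff the list has a duplicate
theorem adjDup_of_sorted (l : List Int) (hs : l.Pairwise (· ≤ ·)) :
    ((l.zip (l.drop 1)).any (fun p => p.1 == p.2)) = !decide l.Nodup := by
  induction l with
  | nil => simp
  | cons a t ih =>
    cases t with
    | nil => simp
    | cons b t =>
      have hab : a ≤ b := (List.pairwise_cons.mp hs).1 b (by simp)
      have htail : (b :: t).Pairwise (· ≤ ·) := (List.pairwise_cons.mp hs).2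
      by_cases heq : a = b
      · subst heq
        simp [List.zip, List.nodup_cons]
      · have hlt : a < b := lt_of_le_of_ne hab heq
        have hnotmem : a ∉ b :: t := by
          intro hm
          rcases List.mem_cons.mp hm with h | h
          · exact heq h
          · have hbx : b ≤ a := (List.pairwise_cons.mp htail).1 a h
            exact absurd hlt (not_lt.mpr hbx)
        have := ih htail
        simp only [List.drop_one, List.tail_cons, List.zip_cons_cons, List.any_cons] at this ⊢
        simp [heq, this, List.nodup_cons, hnotmem]

-- ===== VERDICT (by name: the statement is the Claim_ definition above) =====
theorem detectDoubles_spec : Claim_equal_detectDoubles := by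
  intro l _
  unfold Spec_detectDoubles detectDoubles detectDoubles_alt
  rw [detectDoublesOuter_eq l PySem.Set.empty (by simp [PySem.Set.empty])]
  have hflat : l.flatMap (fun perm => perm) = l.flatten := by simp
  have hsorted : (PySem.List.sorted (l.flatMap (fun perm => perm)) (fun x => x) false).Pairwise (· ≤ ·) :=
    PySem.List.sorted_pairwise _ _
  have hperm : (PySem.List.sorted (l.flatMap (fun perm => perm)) (fun x => x) false).Perm
      (l.flatMap (fun perm => perm)) := PySem.List.sorted_perm _ _ _
  show _ = (let strands := PySem.List.sorted (l.flatMap (fun perm => perm)) (fun x => x) false;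
    (strands.zip (strands.drop 1)).any (fun p => p.1 == p.2))
  simp only
  rw [adjDup_of_sorted _ hsorted]
  simp only [PySem.Set.empty, List.nil_append]
  congr 1
  rw [decide_eq_decide, hperm.nodup_iff, hflat]
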